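-- pv_equiv track=rewrite | github.com/BossWT/CUComProg | 09_MoreDC/09_MoreDC_34.py | pattern3
-- ===== SOURCE A (Python) =====
-- def pattern3(N):
--     ans = []
--     num = 1
--     for i in range(N):
--         c = []
--         for j in range(i):
--             c.append(0)
--         for j in range(N - i):
--             c.append(num)
--             num += 1
--         ans.append(c)
--     return ans
-- ===== SOURCE B (Python) =====
-- def pattern3(N):
--     # row i: i zeros, then N-i sequential numbers starting at the closed-form
--     # offset 1 + i*N - i*(i-1)//2 (= 1 + count of numbers emitted by rows 0..i-1)
--     def row(i):
--         start = 1 + i * N - i * (i - 1) // 2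
--         return [0] * i + list(range(start, start + N - i))
--     return [row(i) for i in range(N)]
-- ===== Notes on version B (the rewrite author's own statement) =====
-- stated objective: simpler
-- what changed: Replaces the shared mutable counter and the two inner append-loops with independent per-row construction: the row's first number is computed in closed form (1 + i*N - i*(i-1)//2) and the row is [0]*i + list(range(...)).
import Mathlib
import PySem

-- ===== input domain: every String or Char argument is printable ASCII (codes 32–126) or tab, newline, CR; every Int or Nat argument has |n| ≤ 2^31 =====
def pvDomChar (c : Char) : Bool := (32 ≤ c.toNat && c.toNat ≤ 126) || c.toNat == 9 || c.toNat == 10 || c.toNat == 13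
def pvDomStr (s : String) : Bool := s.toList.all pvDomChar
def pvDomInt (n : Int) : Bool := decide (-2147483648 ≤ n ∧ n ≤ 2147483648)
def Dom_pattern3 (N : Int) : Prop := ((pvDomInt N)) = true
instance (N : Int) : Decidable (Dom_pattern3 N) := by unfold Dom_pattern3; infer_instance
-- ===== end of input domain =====

-- ===== PORT A =====
-- B builds each row independently from a closed-form start offset instead of threading a mutable counter through nested append-loops (objective: simpler).
def pattern3 (N : Int) : List (List Int) :=
  (((PySem.List.pyRange 0 N 1).foldl
      (fun (st : List (List Int) × Int) i =>
        let c : List Int := (PySem.List.pyRange 0 i 1).foldl (fun c _ => c ++ [(0 : Int)]) []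
        let p := (PySem.List.pyRange 0 (N - i) 1).foldl
          (fun (p : List Int × Int) _ => (p.1 ++ [p.2], p.2 + 1)) (c, st.2)
        (st.1 ++ [p.1], p.2))
      ([], 1))).1

-- ===== PORT B =====
def pvStart (N i : Int) : Int := 1 + i * N - PySem.Int.floordiv (i * (i - 1)) 2
def pvRow (N i : Int) : List Int :=
  List.replicate i.toNat 0 ++ PySem.List.pyRange (pvStart N i) (pvStart N i + N - i) 1
def pattern3_alt (N : Int) : List (List Int) :=
  (PySem.List.pyRange 0 N 1).map (pvRow N)

-- ===== PRECONDITION & SPEC =====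
def Spec_pattern3 (N : Int) (out : List (List Int)) : Prop := out = pattern3_alt N
instance (N : Int) (out : List (List Int)) : Decidable (Spec_pattern3 N out) := by unfold Spec_pattern3; infer_instance

-- ===== CLAIM (what is proved, stated in full; the proofs are below) =====
def Claim_equal_pattern3 : Prop := ∀ (N : Int), Dom_pattern3 N → Spec_pattern3 N (pattern3 N)

-- ===== LEMMAS AND PROOFS =====

-- ===== VERDICT (by name: the statement is the Claim_ definition above) =====
-- inner zero loop
theorem pvZeros (l : List Int) (acc : List Int) :
    l.foldl (fun c _ => c ++ [(0 : Int)]) acc = acc ++ List.replicate l.length 0 := by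
  induction l generalizing acc with
  | nil => simp
  | cons x t ih =>
    simp only [List.foldl_cons, ih, List.length_cons, List.replicate_succ, List.append_assoc]
    simp

-- inner counting loop
theorem pvNums (l : List Int) (c : List Int) (num : Int) :
    l.foldl (fun (p : List Int × Int) _ => (p.1 ++ [p.2], p.2 + 1)) (c, num)
      = (c ++ PySem.List.pyRange num (num + l.length) 1, num + l.length) := by
  induction l generalizing c num with
  | nil => simp [PySem.List.pyRange_one_eq_nil]
  | cons x t ih =>
    simp only [List.foldl_cons, ih, List.length_cons, Prod.mk.injEq]
    push_cast
    refine ⟨?_, by ring⟩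
    have he : num + ((t.length : Int) + 1) = (num + 1) + t.length := by ring
    rw [he, PySem.List.pyRange_one_cons (by omega : num < num + 1 + (t.length : Int))]
    simp

theorem pvStart_step (N k : Int) (_hk : 0 ≤ k) : pvStart N k + (N - k) = pvStart N (k + 1) := by
  unfold pvStart
  rw [PySem.Int.floordiv_eq_ediv_of_pos (by omega), PySem.Int.floordiv_eq_ediv_of_pos (by omega)]
  have h1 : (k + 1) * ((k + 1) - 1) = k * (k - 1) + 2 * k := by ring
  rw [h1]
  have h2 : (k * (k - 1) + 2 * k) / 2 = k * (k - 1) / 2 + k := by omega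
  rw [h2]; ring

-- outer loop invariant
theorem pvOuter (N k : Int) (hk : 0 ≤ k) (hkN : k ≤ N) (acc : List (List Int)) :
    ((PySem.List.pyRange k N 1).foldl
      (fun (st : List (List Int) × Int) i =>
        let c : List Int := (PySem.List.pyRange 0 i 1).foldl (fun c _ => c ++ [(0 : Int)]) []
        let p := (PySem.List.pyRange 0 (N - i) 1).foldl
          (fun (p : List Int × Int) _ => (p.1 ++ [p.2], p.2 + 1)) (c, st.2)
        (st.1 ++ [p.1], p.2))
      (acc, pvStart N k))
      = (acc ++ (PySem.List.pyRange k N 1).map (pvRow N), pvStart N N) := by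
  have hd : (N - k).toNat = (N - k) := by omega
  induction h : (N - k).toNat generalizing k acc with
  | zero =>
    have hkN' : k = N := by omega
    subst hkN'
    simp [PySem.List.pyRange_one_eq_nil le_rfl]
  | succ n ih =>
    have hlt : k < N := by omega
    rw [PySem.List.pyRange_one_cons hlt]
    simp only [List.foldl, List.map_cons]
    rw [pvZeros, pvNums]
    have hlen : ((PySem.List.pyRange 0 (N - k) 1).length : Int) = N - k := by
      rw [PySem.List.length_pyRange_one]; omega
    simp only [hlen]
    have hrow : List.nil ++ List.replicate (PySem.List.pyRange 0 k 1).length (0 : Int)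
        = List.replicate k.toNat (0 : Int) := by
      simp [PySem.List.length_pyRange_one]
    have hst : pvStart N k + (N - k) = pvStart N (k + 1) := pvStart_step N k hk
    rw [hst]
    have hrow2 : (List.nil ++ List.replicate (PySem.List.pyRange 0 k 1).length (0 : Int))
        ++ PySem.List.pyRange (pvStart N k) (pvStart N (k + 1)) 1 = pvRow N k := by
      rw [hrow]; unfold pvRow
      congr 1
      congr 1
      omega
    rw [hrow2, ih (k + 1) (by omega) (by omega) _ (by omega) (by omega)]
    simp

theorem pattern3_spec : Claim_equal_pattern3 := by
  intro N _
  unfold Spec_pattern3 pattern3 pattern3_alt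
  by_cases hN : 0 ≤ N
  · have h0 : pvStart N 0 = 1 := by
      unfold pvStart
      rw [PySem.Int.floordiv_eq_ediv_of_pos (by omega)]
      norm_num
    have hmain := pvOuter N 0 le_rfl hN []
    rw [h0] at hmain
    rw [hmain]
    simp
  · rw [PySem.List.pyRange_one_eq_nil (by omega)]
    simp
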